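-- pv_equiv track=rewrite | github.com/SoneyBoney/advent_of_code_2023 | day22/part2.py | sum_all_parents
-- ===== SOURCE A (Python) =====
-- def sum_all_parents(G_parents,G_children, node):
--     if not G_parents[node]:
--         return 0
--     ret = 0
--     for p in G_parents[node]:
--         if len(G_children[p]) > 1:
--             continue
--         ret += 1+  sum_all_parents(G_parents,G_children,p)
--     return ret
-- ===== SOURCE B (Python) =====
-- def sum_all_parents(G_parents, G_children, node):
--     count = 0
--     stack = [node]
--     while stack:
--         cur = stack.pop()
--         for p in G_parents[cur]:
--             if len(G_children[p]) > 1: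
--                 continue
--             count += 1
--             stack.append(p)
--     return count
-- ===== Notes on version B (the rewrite author's own statement) =====
-- stated objective: alternative
-- what changed: The naive recursion over parent chains is replaced by an iterative traversal with an explicit stack and a single running counter (no memoization, so multiply-reachable nodes are still counted once per path, exactly as in A).
import Mathlib
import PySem

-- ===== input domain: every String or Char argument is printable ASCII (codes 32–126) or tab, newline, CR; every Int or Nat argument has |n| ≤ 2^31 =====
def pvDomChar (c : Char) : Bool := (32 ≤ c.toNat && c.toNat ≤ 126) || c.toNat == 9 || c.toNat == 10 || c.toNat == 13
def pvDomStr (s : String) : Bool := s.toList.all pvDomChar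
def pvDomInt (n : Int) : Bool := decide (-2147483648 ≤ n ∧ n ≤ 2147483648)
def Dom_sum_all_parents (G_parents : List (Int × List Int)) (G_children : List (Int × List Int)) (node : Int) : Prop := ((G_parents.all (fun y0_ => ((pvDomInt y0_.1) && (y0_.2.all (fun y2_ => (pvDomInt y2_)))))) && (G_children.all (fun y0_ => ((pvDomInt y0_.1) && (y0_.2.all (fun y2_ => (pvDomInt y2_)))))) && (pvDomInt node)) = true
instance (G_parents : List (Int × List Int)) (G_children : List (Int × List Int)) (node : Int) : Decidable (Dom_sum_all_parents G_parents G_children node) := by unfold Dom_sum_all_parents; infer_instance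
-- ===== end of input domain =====

-- B replaces A's naive recursion by an explicit-stack iterative traversal with one running counter
-- (no memoization, same counted value); equivalence is about the RETURN value, neither mutates its arguments.

-- ===== PORT A =====
-- A recurses on an arbitrary finite graph, so it need not terminate; the port carries a fuel
-- counter (a totality guard only): under Pre_ below the recursion depth is at most
-- G_parents.length, so the fuel is never exhausted there and the port computes exactly what the
-- Python computes.
def pvAgo (Gp Gc : List (Int × List Int)) : Nat → Int → Int
  | 0, _ => 0
  | fuel+1, node =>
    let ps := (List.lookup node Gp).getD []      -- G_parents[node]; KeyError (none) excluded by Pre_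
    if ps = [] then 0
    else ps.foldl (fun ret p =>
      if (1 : Int) < ((List.lookup p Gc).getD []).length then ret   -- len(G_children[p]) > 1: continue
      else ret + (1 + pvAgo Gp Gc fuel p)) 0

def sum_all_parents (G_parents : List (Int × List Int)) (G_children : List (Int × List Int)) (node : Int) : Int :=
  pvAgo G_parents G_children (G_parents.length + 1) node

-- ===== PORT B =====
-- Fuel bound for the stack loop (a totality guard only): the number of loop iterations is
-- 1 + result, and under Pre_ the result is at most pvBbound M K for M = total number of parent
-- entries and K = G_parents.length + 1.
def pvBbound (M : Nat) : Nat → Nat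
  | 0 => 0
  | d+1 => M * (1 + pvBbound M d)

def pvBgo (Gp Gc : List (Int × List Int)) : Nat → Int → List Int → Int
  | _, count, [] => count                        -- while stack: … falls through
  | 0, count, _ => count                         -- fuel guard, never reached under Pre_
  | fuel+1, count, cur :: st =>
      let s := ((List.lookup cur Gp).getD []).foldl
        (fun (s : Int × List Int) p =>
          if (1 : Int) < ((List.lookup p Gc).getD []).length then s   -- continue
          else (s.1 + 1, p :: s.2))              -- count += 1; stack.append(p)
        (count, st)
      pvBgo Gp Gc fuel s.1 s.2

def sum_all_parents_alt (G_parents : List (Int × List Int)) (G_children : List (Int × List Int)) (node : Int) : Int :=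
  pvBgo G_parents G_children
    (pvBbound ((G_parents.map (fun pr => pr.2.length)).sum) (G_parents.length + 1) + 1)
    0 [node]

-- ===== PRECONDITION & SPEC =====
-- graph helpers Pre_ speaks about: keys, parent list, 'blocked' parents (more than one child),
-- the followed parent edges (the unblocked parents)
def pvKeys (Gp : List (Int × List Int)) : List Int := Gp.map (·.1)
def pvPar (Gp : List (Int × List Int)) (x : Int) : List Int := (List.lookup x Gp).getD []
def pvBlockedB (Gc : List (Int × List Int)) (p : Int) : Bool := decide ((1 : Int) < ((List.lookup p Gc).getD []).length)
def pvFl (Gp Gc : List (Int × List Int)) (x : Int) : List Int := (pvPar Gp x).filter (fun p => ! pvBlockedB Gc p)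

-- pvH k x: length of the longest chain of followed parent edges starting at x, capped at k.
-- This is a property of the input GRAPH only (its longest followed chain), not a run of either
-- program: neither port computes heights; Pre_ uses it solely to say 'the followed subgraph
-- reachable from node is acyclic' in a decidable way.
def pvH (Gp Gc : List (Int × List Int)) : Nat → Int → Nat
  | 0, _ => 0
  | k+1, x => (pvFl Gp Gc x).foldl (fun m p => max m (1 + pvH Gp Gc k p)) 0

-- pvRchB k node x: x is reachable from node along at most k followed parent edges through keys
def pvRchB (Gp Gc : List (Int × List Int)) (node : Int) : Nat → Int → Bool
  | 0, x => x == node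
  | k+1, x => pvRchB Gp Gc node k x ||
      (pvKeys Gp).any (fun y => pvRchB Gp Gc node k y && (pvFl Gp Gc y).contains x)

-- Pre_ excludes exactly the inputs on which the Python A raises or never returns: node (or, for
-- some node reachable from it along followed parent edges, a listed parent) missing from the
-- dicts (KeyError), or a followed cycle reachable from node (infinite recursion) — acyclicity of
-- the reachable followed subgraph is stated as a height bound: no chain of followed parent edges
-- from a reachable node is longer than the number of G_parents keys.
def Pre_sum_all_parents (G_parents : List (Int × List Int)) (G_children : List (Int × List Int)) (node : Int) : Prop :=
  node ∈ pvKeys G_parents ∧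
  ∀ x ∈ pvKeys G_parents, pvRchB G_parents G_children node G_parents.length x = true →
    pvH G_parents G_children (G_parents.length + 1) x ≤ G_parents.length ∧
    ∀ p ∈ pvPar G_parents x,
      p ∈ G_children.map (·.1) ∧
      (pvBlockedB G_children p = false → p ∈ pvKeys G_parents)

instance (G_parents : List (Int × List Int)) (G_children : List (Int × List Int)) (node : Int) : Decidable (Pre_sum_all_parents G_parents G_children node) := by
  unfold Pre_sum_all_parents; infer_instance

def pvWitness_sum_all_parents : (List (Int × List Int)) × (List (Int × List Int)) × Int :=
  ([(0, [1]), (1, [])], [(1, [0])], 0)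

def Spec_sum_all_parents (G_parents : List (Int × List Int)) (G_children : List (Int × List Int)) (node : Int) (out : Int) : Prop := out = sum_all_parents_alt G_parents G_children node
instance (G_parents : List (Int × List Int)) (G_children : List (Int × List Int)) (node : Int) (out : Int) : Decidable (Spec_sum_all_parents G_parents G_children node out) := by unfold Spec_sum_all_parents; infer_instance

-- ===== CLAIM (what is proved, stated in full; the proofs are below) =====
def Claim_equal_sum_all_parents : Prop := ∀ (G_parents : List (Int × List Int)) (G_children : List (Int × List Int)) (node : Int), Dom_sum_all_parents G_parents G_children node → Pre_sum_all_parents G_parents G_children node → Spec_sum_all_parents G_parents G_children node (sum_all_parents G_parents G_children node)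

-- ===== LEMMAS AND PROOFS =====

-- proof-side abbreviations
def pvF (Gp Gc : List (Int × List Int)) (x : Int) : Int := pvAgo Gp Gc (Gp.length + 1) x
def pvM (Gp Gc : List (Int × List Int)) (x : Int) : Nat := pvH Gp Gc (Gp.length + 1) x
-- the hypothesis every lemma needs: Pre_'s second component
def pvHyp (Gp Gc : List (Int × List Int)) (node : Int) : Prop :=
  ∀ x ∈ pvKeys Gp, pvRchB Gp Gc node Gp.length x = true →
    pvH Gp Gc (Gp.length + 1) x ≤ Gp.length ∧
    ∀ p ∈ pvPar Gp x,
      p ∈ Gc.map (·.1) ∧ (pvBlockedB Gc p = false → p ∈ pvKeys Gp)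
-- nodes the proofs track: keys, reachable within N - pvM steps, with bounded height
def pvG (Gp Gc : List (Int × List Int)) (node x : Int) : Prop :=
  x ∈ pvKeys Gp ∧ pvRchB Gp Gc node (Gp.length - pvM Gp Gc x) x = true ∧
  pvM Gp Gc x ≤ Gp.length

-- foldl-max toolkit
theorem pvFoldlMax_init (f : Int → Nat) :
    ∀ (l : List Int) (a : Nat), a ≤ l.foldl (fun m p => max m (f p)) a := by
  intro l
  induction l with
  | nil => intro a; simp
  | cons p l ih =>
    intro a
    calc a ≤ max a (f p) := le_max_left _ _
      _ ≤ _ := ih _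

theorem pvFoldlMax_le_of_mem (f : Int → Nat) :
    ∀ (l : List Int) (a : Nat) (p : Int), p ∈ l → f p ≤ l.foldl (fun m q => max m (f q)) a := by
  intro l
  induction l with
  | nil => intro a p hp; cases hp
  | cons q l ih =>
    intro a p hp
    rcases List.mem_cons.mp hp with rfl | hp
    · calc f p ≤ max a (f p) := le_max_right _ _
        _ ≤ _ := pvFoldlMax_init f l _
    · exact ih _ p hp

theorem pvFoldlMax_congr (f g : Int → Nat) :
    ∀ (l : List Int) (a : Nat), (∀ p ∈ l, f p = g p) →
      l.foldl (fun m p => max m (f p)) a = l.foldl (fun m p => max m (g p)) a := by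
  intro l
  induction l with
  | nil => intro a _; rfl
  | cons q l ih =>
    intro a h
    simp only [List.foldl_cons, h q (List.mem_cons_self ..)]
    exact ih _ (fun p hp => h p (List.mem_cons_of_mem _ hp))

theorem pvH_succ_def (Gp Gc : List (Int × List Int)) (k : Nat) (x : Int) :
    pvH Gp Gc (k+1) x = (pvFl Gp Gc x).foldl (fun m p => max m (1 + pvH Gp Gc k p)) 0 := rfl

theorem pvH_stab (Gp Gc : List (Int × List Int)) :
    ∀ (k : Nat) (x : Int), pvH Gp Gc (k+1) x ≤ k → pvH Gp Gc k x = pvH Gp Gc (k+1) x := by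
  intro k
  induction k with
  | zero =>
    intro x h
    have h' : pvH Gp Gc 1 x = 0 := Nat.le_zero.mp h
    rw [h']
    rfl
  | succ k ih =>
    intro x h
    rw [pvH_succ_def Gp Gc k x, pvH_succ_def Gp Gc (k+1) x]
    refine pvFoldlMax_congr _ _ _ _ ?_
    intro p hp
    have h1 : 1 + pvH Gp Gc (k+1) p ≤ pvH Gp Gc (k+1+1) x := by
      rw [pvH_succ_def Gp Gc (k+1) x]
      exact pvFoldlMax_le_of_mem (fun q => 1 + pvH Gp Gc (k+1) q) (pvFl Gp Gc x) 0 p hp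
    have h2 : pvH Gp Gc (k+1) p ≤ k := by omega
    rw [ih p h2]

theorem pvRchB_succ_def (Gp Gc : List (Int × List Int)) (node : Int) (k : Nat) (x : Int) :
    pvRchB Gp Gc node (k+1) x = (pvRchB Gp Gc node k x ||
      (pvKeys Gp).any (fun y => pvRchB Gp Gc node k y && (pvFl Gp Gc y).contains x)) := rfl

theorem pvRchB_succ (Gp Gc : List (Int × List Int)) (node : Int) :
    ∀ (k : Nat) (x : Int), pvRchB Gp Gc node k x = true → pvRchB Gp Gc node (k+1) x = true := by
  intro k x h
  rw [pvRchB_succ_def]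
  simp only [Bool.or_eq_true]
  exact Or.inl h

theorem pvRchB_mono (Gp Gc : List (Int × List Int)) (node : Int) {k k' : Nat} (hk : k ≤ k') :
    ∀ (x : Int), pvRchB Gp Gc node k x = true → pvRchB Gp Gc node k' x = true := by
  induction k' with
  | zero => intro x h; have : k = 0 := by omega
            simpa [this] using h
  | succ k' ih =>
    intro x h
    by_cases hkk : k = k' + 1
    · simpa [hkk] using h
    · exact pvRchB_succ Gp Gc node k' x (ih (by omega) x h)

theorem pvRchB_step (Gp Gc : List (Int × List Int)) (node : Int) {k : Nat} {x p : Int}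
    (hxK : x ∈ pvKeys Gp) (hx : pvRchB Gp Gc node k x = true) (hp : p ∈ pvFl Gp Gc x) :
    pvRchB Gp Gc node (k+1) p = true := by
  rw [pvRchB_succ_def]
  simp only [Bool.or_eq_true, List.any_eq_true, Bool.and_eq_true]
  exact Or.inr ⟨x, hxK, hx, by simpa [List.contains_iff_mem] using hp⟩

theorem pvStep {Gp Gc : List (Int × List Int)} {node : Int} (H : pvHyp Gp Gc node)
    {x p : Int} (hx : pvG Gp Gc node x) (hp : p ∈ pvFl Gp Gc x) :
    pvG Gp Gc node p ∧ pvM Gp Gc p < pvM Gp Gc x := by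
  obtain ⟨hxK, hxR, hxM⟩ := hx
  have hpU : p ∈ pvPar Gp x ∧ pvBlockedB Gc p = false := by
    have := List.mem_filter.mp hp
    exact ⟨this.1, by simpa using this.2⟩
  have hxRN : pvRchB Gp Gc node Gp.length x = true :=
    pvRchB_mono Gp Gc node (Nat.sub_le _ _) x hxR
  have hX := H x hxK hxRN
  have hpK : p ∈ pvKeys Gp := (hX.2 p hpU.1).2 hpU.2
  -- 1 + height of p below height of x
  have h1 : 1 + pvH Gp Gc Gp.length p ≤ pvM Gp Gc x := by
    unfold pvM
    rw [pvH_succ_def]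
    exact pvFoldlMax_le_of_mem (fun q => 1 + pvH Gp Gc Gp.length q) (pvFl Gp Gc x) 0 p hp
  have hx1 : 1 ≤ pvM Gp Gc x := by omega
  -- p is reachable within N steps
  have hpR1 : pvRchB Gp Gc node (Gp.length - pvM Gp Gc x + 1) p = true :=
    pvRchB_step Gp Gc node hxK hxR hp
  have hpRN : pvRchB Gp Gc node Gp.length p = true :=
    pvRchB_mono Gp Gc node (by omega) p hpR1
  have hP := H p hpK hpRN
  have hpM : pvM Gp Gc p ≤ Gp.length := hP.1
  have hstab : pvH Gp Gc Gp.length p = pvM Gp Gc p := pvH_stab Gp Gc Gp.length p hpM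
  have hlt : pvM Gp Gc p < pvM Gp Gc x := by omega
  refine ⟨⟨hpK, ?_, hpM⟩, hlt⟩
  exact pvRchB_mono Gp Gc node (by omega) p hpR1

theorem pvFoldl_sum (Gc : List (Int × List Int)) (g : Int → Int) :
    ∀ (l : List Int) (a : Int),
      l.foldl (fun ret p => if (1 : Int) < ((List.lookup p Gc).getD []).length then ret
                            else ret + (1 + g p)) a
      = a + ((l.filter (fun p => ! pvBlockedB Gc p)).map (fun p => 1 + g p)).sum := by
  intro l
  induction l with
  | nil => intro a; simp
  | cons p l ih =>
    intro a
    rw [List.foldl_cons, List.filter_cons]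
    by_cases hb : (1 : Int) < ((List.lookup p Gc).getD []).length
    · rw [if_pos hb, ih]
      simp [pvBlockedB, hb]
    · rw [if_neg hb, ih]
      simp only [pvBlockedB, hb, decide_false, Bool.not_false, if_true, List.map_cons,
        List.sum_cons]
      ring

theorem pvAgo_sum (Gp Gc : List (Int × List Int)) (fuel : Nat) (x : Int) :
    pvAgo Gp Gc (fuel + 1) x = ((pvFl Gp Gc x).map (fun p => 1 + pvAgo Gp Gc fuel p)).sum := by
  simp only [pvAgo]
  by_cases hps : (List.lookup x Gp).getD [] = []
  · rw [if_pos hps]; simp [pvFl, pvPar, hps]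
  · rw [if_neg hps, pvFoldl_sum]
    simp [pvFl, pvPar]

theorem pvAgo_stable {Gp Gc : List (Int × List Int)} {node : Int} (H : pvHyp Gp Gc node) :
    ∀ (d : Nat) (x : Int), pvG Gp Gc node x → pvM Gp Gc x < d →
      ∀ f1 f2, d ≤ f1 → d ≤ f2 → pvAgo Gp Gc f1 x = pvAgo Gp Gc f2 x := by
  intro d
  induction d with
  | zero => intro x _ hd; omega
  | succ d ih =>
    intro x hx hd f1 f2 h1 h2
    obtain ⟨a, rfl⟩ : ∃ a, f1 = a + 1 := ⟨f1 - 1, by omega⟩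
    obtain ⟨b, rfl⟩ : ∃ b, f2 = b + 1 := ⟨f2 - 1, by omega⟩
    rw [pvAgo_sum, pvAgo_sum]
    congr 1
    refine List.map_congr_left ?_
    intro p hp
    obtain ⟨hGp, hlt⟩ := pvStep H hx hp
    have := ih p hGp (by omega) a b (by omega) (by omega)
    rw [this]

theorem pvF_unfold {Gp Gc : List (Int × List Int)} {node : Int} (H : pvHyp Gp Gc node)
    {x : Int} (hx : pvG Gp Gc node x) :
    pvF Gp Gc x = ((pvFl Gp Gc x).map (fun p => 1 + pvF Gp Gc p)).sum := by
  unfold pvF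
  rw [pvAgo_sum]
  congr 1
  refine List.map_congr_left ?_
  intro p hp
  obtain ⟨hGp, hlt⟩ := pvStep H hx hp
  have hxM : pvM Gp Gc x ≤ Gp.length := hx.2.2
  have := pvAgo_stable H (pvM Gp Gc p + 1) p hGp (by omega) Gp.length (Gp.length + 1)
    (by omega) (by omega)
  rw [this]

theorem pvAgo_nonneg (Gp Gc : List (Int × List Int)) :
    ∀ (fuel : Nat) (x : Int), 0 ≤ pvAgo Gp Gc fuel x := by
  intro fuel
  induction fuel with
  | zero => intro x; simp [pvAgo]
  | succ fuel ih =>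
    intro x
    rw [pvAgo_sum]
    apply List.sum_nonneg
    intro y hy
    simp only [List.mem_map] at hy
    obtain ⟨p, _, rfl⟩ := hy
    have := ih p; omega

theorem pvF_nonneg (Gp Gc : List (Int × List Int)) (x : Int) : 0 ≤ pvF Gp Gc x :=
  pvAgo_nonneg Gp Gc _ x

theorem pvSum_toNat (Gp Gc : List (Int × List Int)) :
    ∀ (l : List Int),
      ((l.map (fun p => 1 + pvF Gp Gc p)).sum).toNat
      = (l.map (fun p => 1 + (pvF Gp Gc p).toNat)).sum := by
  intro l
  induction l with
  | nil => simp
  | cons p l ih =>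
    have h1 : 0 ≤ pvF Gp Gc p := pvF_nonneg Gp Gc p
    have h2 : 0 ≤ ((l.map (fun p => 1 + pvF Gp Gc p)).sum) := by
      apply List.sum_nonneg
      intro y hy
      simp only [List.mem_map] at hy
      obtain ⟨q, _, rfl⟩ := hy
      have := pvF_nonneg Gp Gc q; omega
    simp only [List.map_cons, List.sum_cons]
    rw [Int.toNat_add (by omega) h2, ih]
    omega

theorem pvLookup_len_le : ∀ (Gp : List (Int × List Int)) (x : Int),
    ((List.lookup x Gp).getD []).length ≤ (Gp.map (fun pr => pr.2.length)).sum := by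
  intro Gp
  induction Gp with
  | nil => intro x; simp
  | cons pr Gp ih =>
    intro x
    simp only [List.lookup, List.map_cons, List.sum_cons]
    by_cases h : x == pr.1
    · rw [h]; simp
    · simp only [show (x == pr.1) = false by simpa using h]
      have := ih x; omega

theorem pvF_bound {Gp Gc : List (Int × List Int)} {node : Int} (H : pvHyp Gp Gc node) :
    ∀ (d : Nat) (x : Int), pvG Gp Gc node x → pvM Gp Gc x < d →
      (pvF Gp Gc x).toNat ≤ pvBbound ((Gp.map (fun pr => pr.2.length)).sum) d := by
  intro d
  induction d with
  | zero => intro x _ hd; omega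
  | succ d ih =>
    intro x hx hd
    rw [pvF_unfold H hx, pvSum_toNat]
    have hlen : (pvFl Gp Gc x).length ≤ (Gp.map (fun pr => pr.2.length)).sum := by
      calc (pvFl Gp Gc x).length ≤ (pvPar Gp x).length := List.length_filter_le _ _
        _ ≤ _ := pvLookup_len_le Gp x
    have hbd : ∀ y ∈ (pvFl Gp Gc x).map (fun p => 1 + (pvF Gp Gc p).toNat),
        y ≤ 1 + pvBbound ((Gp.map (fun pr => pr.2.length)).sum) d := by
      intro y hy
      simp only [List.mem_map] at hy
      obtain ⟨p, hp, rfl⟩ := hy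
      obtain ⟨hGp, hlt⟩ := pvStep H hx hp
      have := ih p hGp (by omega)
      omega
    calc ((pvFl Gp Gc x).map (fun p => 1 + (pvF Gp Gc p).toNat)).sum
        ≤ ((pvFl Gp Gc x).map (fun p => 1 + (pvF Gp Gc p).toNat)).length
          • (1 + pvBbound ((Gp.map (fun pr => pr.2.length)).sum) d) :=
          List.sum_le_card_nsmul _ _ hbd
      _ ≤ (Gp.map (fun pr => pr.2.length)).sum * (1 + pvBbound ((Gp.map (fun pr => pr.2.length)).sum) d) := by
          simp only [List.length_map, smul_eq_mul]
          exact Nat.mul_le_mul_right _ hlen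
      _ = pvBbound ((Gp.map (fun pr => pr.2.length)).sum) (d + 1) := rfl

theorem pvIter (Gc : List (Int × List Int)) :
    ∀ (l : List Int) (c : Int) (s : List Int),
      l.foldl (fun (st : Int × List Int) p =>
          if (1 : Int) < ((List.lookup p Gc).getD []).length then st
          else (st.1 + 1, p :: st.2)) (c, s)
      = (c + (l.filter (fun p => ! pvBlockedB Gc p)).length,
         (l.filter (fun p => ! pvBlockedB Gc p)).reverse ++ s) := by
  intro l
  induction l with
  | nil => intro c s; simp
  | cons p l ih =>
    intro c s
    rw [List.foldl_cons, List.filter_cons]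
    by_cases hb : (1 : Int) < ((List.lookup p Gc).getD []).length
    · rw [if_pos hb, ih]
      simp [pvBlockedB, hb]
    · rw [if_neg hb, ih]
      simp only [pvBlockedB, hb, decide_false, Bool.not_false, if_true, List.length_cons,
        List.reverse_cons, List.append_assoc, List.cons_append, List.nil_append]
      congr 1
      push_cast; ring

theorem pvBgo_eq {Gp Gc : List (Int × List Int)} {node : Int} (H : pvHyp Gp Gc node) :
    ∀ (fuel : Nat) (stack : List Int) (count : Int), (∀ x ∈ stack, pvG Gp Gc node x) →
      (stack.map (fun x => 1 + (pvF Gp Gc x).toNat)).sum ≤ fuel →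
      pvBgo Gp Gc fuel count stack = count + (stack.map (pvF Gp Gc)).sum := by
  intro fuel
  induction fuel with
  | zero =>
    intro stack count hk hc
    cases stack with
    | nil => simp [pvBgo]
    | cons x st => simp at hc
  | succ fuel ih =>
    intro stack count hk hc
    cases stack with
    | nil => simp [pvBgo]
    | cons cur st =>
      have hcur : pvG Gp Gc node cur := hk cur (List.mem_cons_self ..)
      have hF : pvF Gp Gc cur = ((pvFl Gp Gc cur).map (fun p => 1 + pvF Gp Gc p)).sum :=
        pvF_unfold H hcur
      have hfl : ∀ p ∈ pvFl Gp Gc cur, pvG Gp Gc node p := by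
        intro p hp
        exact (pvStep H hcur hp).1
      simp only [pvBgo]
      rw [show ((List.lookup cur Gp).getD []).foldl
            (fun (st : Int × List Int) p =>
              if (1 : Int) < ((List.lookup p Gc).getD []).length then st
              else (st.1 + 1, p :: st.2)) (count, st)
          = (count + (pvFl Gp Gc cur).length, (pvFl Gp Gc cur).reverse ++ st) by
        rw [pvIter]; rfl]
      rw [ih]
      · rw [List.map_append, List.sum_append, List.map_reverse, List.sum_reverse]
        have hsplit : ((pvFl Gp Gc cur).length : Int) + ((pvFl Gp Gc cur).map (pvF Gp Gc)).sum
            = pvF Gp Gc cur := by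
          rw [hF]
          clear hF hfl hcur hc hk ih
          induction pvFl Gp Gc cur with
          | nil => simp
          | cons q l ihq =>
            simp only [List.map_cons, List.sum_cons, List.length_cons] at *
            push_cast at *
            omega
        simp only [List.map_cons, List.sum_cons]
        omega
      · intro x hx
        rcases List.mem_append.mp hx with h | h
        · exact hfl x (List.mem_reverse.mp h)
        · exact hk x (List.mem_cons_of_mem _ h)
      · have hcost : (((pvFl Gp Gc cur).reverse ++ st).map (fun x => 1 + (pvF Gp Gc x).toNat)).sum
            = (pvF Gp Gc cur).toNat + ((st.map (fun x => 1 + (pvF Gp Gc x).toNat)).sum) := by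
          rw [List.map_append, List.sum_append, List.map_reverse, List.sum_reverse]
          rw [show ((pvFl Gp Gc cur).map (fun x => 1 + (pvF Gp Gc x).toNat)).sum
                = (pvF Gp Gc cur).toNat by rw [hF, pvSum_toNat]]
        rw [hcost]
        simp only [List.map_cons, List.sum_cons] at hc
        omega

-- ===== VERDICT (by name: the statement is the Claim_ definition above) =====
theorem sum_all_parents_spec : Claim_equal_sum_all_parents := by
  unfold Claim_equal_sum_all_parents
  intro Gp Gc node _hdom hpre
  unfold Spec_sum_all_parents sum_all_parents sum_all_parents_alt
  obtain ⟨hnode, H⟩ := hpre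
  have hR0 : pvRchB Gp Gc node 0 node = true := by simp [pvRchB]
  have hRN : pvRchB Gp Gc node Gp.length node = true :=
    pvRchB_mono Gp Gc node (Nat.zero_le _) node hR0
  have hM : pvM Gp Gc node ≤ Gp.length := (H node hnode hRN).1
  have hGnode : pvG Gp Gc node node :=
    ⟨hnode, pvRchB_mono Gp Gc node (Nat.zero_le _) node hR0, hM⟩
  rw [pvBgo_eq H]
  · simp only [List.map_cons, List.map_nil, List.sum_cons, List.sum_nil]
    have : pvAgo Gp Gc (Gp.length + 1) node = pvF Gp Gc node := rfl
    rw [this]; ring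
  · intro x hx
    have hxn : x = node := by simpa using hx
    subst hxn
    exact hGnode
  · simp only [List.map_cons, List.map_nil, List.sum_cons, List.sum_nil]
    have := pvF_bound H (Gp.length + 1) node hGnode (by omega)
    omega
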